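-- pv_equiv track=rewrite | github.com/wmodanez/dash-ods | app.py | find_best_initial_value
-- ===== SOURCE A (Python) =====
-- def find_best_initial_value(filter_values, preference_list=None):
--     """
--     Encontra o melhor valor inicial para um filtro com base em uma lista de preferências.
--
--     Args:
--         filter_values: Lista de valores disponíveis para o filtro
--         preference_list: Lista de termos preferenciais ordenados por prioridade
--
--     Returns:
--         O melhor valor encontrado ou o primeiro valor se nenhuma preferência corresponder
--     """
--     if not filter_values:
--         return None
--
--     # Lista padrão de termos preferenciais se nenhuma for fornecida
--     if preference_list is None:
--         preference_list = ['Total', 'Todos', 'Todas', 'Geral', 'Ambos', 'Ambas']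
--
--     # Converte tudo para string para comparação
--     filter_values_str = [str(val).strip().lower() for val in filter_values]
--
--     # Primeiro tenta encontrar correspondências exatas
--     for pref in preference_list:
--         pref_lower = pref.lower()
--         if pref_lower in filter_values_str:
--             idx = filter_values_str.index(pref_lower)
--             return filter_values[idx]
--
--     # Depois tenta encontrar valores que contenham os termos preferenciais
--     for pref in preference_list:
--         pref_lower = pref.lower()
--         for i, val in enumerate(filter_values_str):
--             if pref_lower in val:
--                 return filter_values[i]
--
--     # Se não encontrar nada, retorna o primeiro valor
--     return filter_values[0]
-- ===== SOURCE B (Python) =====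
-- def find_best_initial_value(filter_values, preference_list=None):
--     """One scoring pass: rank every value by (phase, preference-index), then pick
--     the value minimizing (phase, pref_index, value_index)."""
--     if not filter_values:
--         return None
--
--     if preference_list is None:
--         preference_list = ['Total', 'Todos', 'Todas', 'Geral', 'Ambos', 'Ambas']
--
--     prefs = [p.lower() for p in preference_list]
--     fvs = [str(v).strip().lower() for v in filter_values]
--
--     def rank(s):
--         for j, p in enumerate(prefs):
--             if s == p:
--                 return (0, j)
--         for j, p in enumerate(prefs):
--             if p in s:
--                 return (1, j)
--         return (2, 0)
--
--     best = 0
--     for i in range(1, len(fvs)):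
--         if (rank(fvs[i]), i) < (rank(fvs[best]), best):
--             best = i
--     return filter_values[best]
-- ===== Notes on version B (the rewrite author's own statement) =====
-- stated objective: alternative
-- what changed: A's two global scan-and-early-return phases (exact match over preferences, then substring match) are replaced by a single pass that scores each value with a (phase, preference-index) rank and selects the index minimizing (phase, pref_index, value_index).
import Mathlib
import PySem

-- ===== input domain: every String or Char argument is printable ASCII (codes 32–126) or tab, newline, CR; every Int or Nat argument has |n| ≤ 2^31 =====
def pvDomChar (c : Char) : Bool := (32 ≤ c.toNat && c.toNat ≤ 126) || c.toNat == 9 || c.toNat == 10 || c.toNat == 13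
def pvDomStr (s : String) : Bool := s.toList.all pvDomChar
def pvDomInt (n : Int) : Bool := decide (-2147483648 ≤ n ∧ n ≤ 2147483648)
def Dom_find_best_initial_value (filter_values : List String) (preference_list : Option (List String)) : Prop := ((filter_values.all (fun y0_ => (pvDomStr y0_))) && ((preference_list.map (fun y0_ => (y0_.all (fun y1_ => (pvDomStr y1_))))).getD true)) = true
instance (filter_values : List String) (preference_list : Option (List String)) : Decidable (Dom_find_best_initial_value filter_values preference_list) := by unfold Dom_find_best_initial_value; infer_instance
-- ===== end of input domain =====

-- B replaces A's two global scan-and-early-return phases by a single scoring pass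
-- (rank each value by (phase, preference-index), pick the lexicographic minimum);
-- objective: alternative decomposition, same cost.

-- ===== PORT A =====
-- first loop of A: for pref in preference_list: if pref.lower() in filter_values_str: return filter_values[index]
def pvA_phase1 (prefs fvs fv : List String) : Option String :=
  match prefs with
  | [] => none
  | p :: rest =>
    let pl := PySem.Str.lower p
    if fvs.contains pl then
      match PySem.List.index? fvs pl with
      | some idx => PySem.List.pyGet? fv (idx : Int)
      | none => none
    else pvA_phase1 rest fvs fv

-- inner loop of A's second phase: for i, val in enumerate(filter_values_str): if pref_lower in val: return filter_values[i]
def pvA_inner (pl : String) (i : Nat) (fvs fv : List String) : Option String :=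
  match fvs with
  | [] => none
  | v :: rest =>
    if PySem.Str.isIn pl v then PySem.List.pyGet? fv (i : Int)
    else pvA_inner pl (i + 1) rest fv

-- second loop of A over the preferences
def pvA_phase2 (prefs fvs fv : List String) : Option String :=
  match prefs with
  | [] => none
  | p :: rest =>
    match pvA_inner (PySem.Str.lower p) 0 fvs fv with
    | some r => some r
    | none => pvA_phase2 rest fvs fv

def find_best_initial_value (filter_values : List String) (preference_list : Option (List String)) : Option String :=
  if filter_values.isEmpty then none
  else
    let prefs := preference_list.getD ["Total", "Todos", "Todas", "Geral", "Ambos", "Ambas"]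
    let fvs := filter_values.map (fun v => PySem.Str.lower (PySem.Str.strip v))
    match pvA_phase1 prefs fvs filter_values with
    | some r => some r
    | none =>
      match pvA_phase2 prefs fvs filter_values with
      | some r => some r
      | none => PySem.List.pyGet? filter_values 0

-- ===== PORT B =====
-- first index j >= start such that s equals prefs[j]
def pvB_firstEq (s : String) (prefs : List String) (j : Nat) : Option Nat :=
  match prefs with
  | [] => none
  | p :: rest => if s == p then some j else pvB_firstEq s rest (j + 1)

-- first index j >= start such that prefs[j] is a substring of s
def pvB_firstSub (s : String) (prefs : List String) (j : Nat) : Option Nat :=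
  match prefs with
  | [] => none
  | p :: rest => if PySem.Str.isIn p s then some j else pvB_firstSub s rest (j + 1)

-- rank of a (normalised) value: (0, j) exact match, (1, j) substring match, (2, 0) otherwise
def pvB_rank (prefs : List String) (s : String) : Nat × Nat :=
  match pvB_firstEq s prefs 0 with
  | some j => (0, j)
  | none =>
    match pvB_firstSub s prefs 0 with
    | some j => (1, j)
    | none => (2, 0)

-- lexicographic < on ((phase, pref_index), value_index)
def pvB_lt (a b : (Nat × Nat) × Nat) : Bool :=
  a.1.1 < b.1.1 || (a.1.1 == b.1.1 && (a.1.2 < b.1.2 || (a.1.2 == b.1.2 && a.2 < b.2)))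

def find_best_initial_value_alt (filter_values : List String) (preference_list : Option (List String)) : Option String :=
  if filter_values.isEmpty then none
  else
    let prefs0 := preference_list.getD ["Total", "Todos", "Todas", "Geral", "Ambos", "Ambas"]
    let prefs := prefs0.map PySem.Str.lower
    let fvs := filter_values.map (fun v => PySem.Str.lower (PySem.Str.strip v))
    let best := (List.range' 1 (fvs.length - 1)).foldl
      (fun b i =>
        if pvB_lt (pvB_rank prefs (fvs.getD i ""), i) (pvB_rank prefs (fvs.getD b ""), b) then i else b) 0
    filter_values[best]?

-- ===== PRECONDITION & SPEC =====
def Spec_find_best_initial_value (filter_values : List String) (preference_list : Option (List String)) (out : Option String) : Prop := out = find_best_initial_value_alt filter_values preference_list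
instance (filter_values : List String) (preference_list : Option (List String)) (out : Option String) : Decidable (Spec_find_best_initial_value filter_values preference_list out) := by unfold Spec_find_best_initial_value; infer_instance

-- ===== CLAIM (what is proved, stated in full; the proofs are below) =====
def Claim_equal_find_best_initial_value : Prop := ∀ (filter_values : List String) (preference_list : Option (List String)), Dom_find_best_initial_value filter_values preference_list → Spec_find_best_initial_value filter_values preference_list (find_best_initial_value filter_values preference_list)

-- ===== LEMMAS AND PROOFS =====

-- ----- order lemmas -----
lemma pvB_lt_trans {a b c : (Nat × Nat) × Nat} (h1 : pvB_lt a b = true) (h2 : pvB_lt b c = true) :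
    pvB_lt a c = true := by
  obtain ⟨⟨a1, a2⟩, a3⟩ := a; obtain ⟨⟨b1, b2⟩, b3⟩ := b; obtain ⟨⟨c1, c2⟩, c3⟩ := c
  simp [pvB_lt] at *; omega

lemma pvB_lt_asymm {a b : (Nat × Nat) × Nat} (h : pvB_lt a b = true) : pvB_lt b a = false := by
  obtain ⟨⟨a1, a2⟩, a3⟩ := a; obtain ⟨⟨b1, b2⟩, b3⟩ := b
  simp [pvB_lt] at *; omega

lemma pvB_lt_connex {a b : (Nat × Nat) × Nat} (hne : a.2 ≠ b.2) (h : pvB_lt a b = false) :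
    pvB_lt b a = true := by
  obtain ⟨⟨a1, a2⟩, a3⟩ := a; obtain ⟨⟨b1, b2⟩, b3⟩ := b
  simp [pvB_lt] at h ⊢; simp only [ne_eq] at hne; omega

-- ----- fold invariant: the fold computes the unique pvB_lt-minimal index -----
lemma pvFold_inv (key : Nat → (Nat × Nat) × Nat) (hkey : ∀ i, (key i).2 = i)
    (l : List Nat) (b : Nat) :
    (l.foldl (fun b i => if pvB_lt (key i) (key b) then i else b) b = b ∨
     l.foldl (fun b i => if pvB_lt (key i) (key b) then i else b) b ∈ l) ∧
    (∀ i, (i = b ∨ i ∈ l) → i ≠ l.foldl (fun b i => if pvB_lt (key i) (key b) then i else b) b →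
      pvB_lt (key (l.foldl (fun b i => if pvB_lt (key i) (key b) then i else b) b)) (key i) = true) := by
  induction l generalizing b with
  | nil =>
    constructor
    · left; rfl
    · intro i hi hne
      rcases hi with hi | hi
      · exact absurd hi hne
      · exact absurd hi (List.not_mem_nil)
  | cons a l ih =>
    simp only [List.foldl_cons]
    by_cases hlt : pvB_lt (key a) (key b) = true
    · simp only [hlt, if_true]
      obtain ⟨h1, h2⟩ := ih a
      generalize hR : List.foldl (fun b i => if pvB_lt (key i) (key b) = true then i else b) a l = r at h1 h2 ⊢
      refine ⟨?_, ?_⟩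
      · rcases h1 with h1 | h1
        · right; rw [h1]; exact List.mem_cons_self
        · right; exact List.mem_cons_of_mem a h1
      · intro i hi hne
        rcases hi with hi | hi
        · subst hi
          by_cases hra : r = a
          · rw [hra]; exact hlt
          · exact pvB_lt_trans (h2 a (Or.inl rfl) (fun h => hra h.symm)) hlt
        · rcases List.mem_cons.mp hi with hi | hi
          · subst hi; exact h2 i (Or.inl rfl) hne
          · exact h2 i (Or.inr hi) hne
    · rw [if_neg hlt]
      obtain ⟨h1, h2⟩ := ih b
      generalize hR : List.foldl (fun b i => if pvB_lt (key i) (key b) = true then i else b) b l = r at h1 h2 ⊢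
      refine ⟨?_, ?_⟩
      · rcases h1 with h1 | h1
        · left; exact h1
        · right; exact List.mem_cons_of_mem a h1
      · intro i hi hne
        rcases hi with hi | hi
        · exact h2 i (Or.inl hi) hne
        · rcases List.mem_cons.mp hi with hi | hi
          · subst hi
            by_cases hab : i = b
            · exact h2 i (Or.inl hab) hne
            · have hba : pvB_lt (key b) (key i) = true := by
                apply pvB_lt_connex
                · rw [hkey i, hkey b]; exact hab
                · exact Bool.eq_false_iff.mpr hlt
              by_cases hrb : r = b
              · rw [hrb]; exact hba
              · exact pvB_lt_trans (h2 b (Or.inl rfl) (fun h => hrb h.symm)) hba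
          · exact h2 i (Or.inr hi) hne

lemma pvBest_unique (key : Nat → (Nat × Nat) × Nat) (n b c : Nat)
    (hb : b < n) (hbm : ∀ i < n, i ≠ b → pvB_lt (key b) (key i) = true)
    (hc : c < n) (hcm : ∀ i < n, i ≠ c → pvB_lt (key c) (key i) = true) : b = c := by
  by_contra hne
  have h1 := hbm c hc (fun h => hne h.symm)
  have h2 := hcm b hb hne
  rw [pvB_lt_asymm h1] at h2; exact Bool.false_ne_true h2

-- ----- characterizations of A's loops -----
def pvA1' (prefs fvs fv : List String) : Option String :=
  match prefs with
  | [] => none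
  | p :: rest =>
    if fvs.contains p then
      match PySem.List.index? fvs p with
      | some idx => PySem.List.pyGet? fv (idx : Int)
      | none => none
    else pvA1' rest fvs fv

def pvA2' (prefs fvs fv : List String) : Option String :=
  match prefs with
  | [] => none
  | p :: rest =>
    match pvA_inner p 0 fvs fv with
    | some r => some r
    | none => pvA2' rest fvs fv

lemma pvA_phase1_lower (prefs fvs fv : List String) :
    pvA_phase1 prefs fvs fv = pvA1' (prefs.map PySem.Str.lower) fvs fv := by
  induction prefs with
  | nil => rfl
  | cons p rest ih => simp [pvA_phase1, pvA1', ih]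

lemma pvA_phase2_lower (prefs fvs fv : List String) :
    pvA_phase2 prefs fvs fv = pvA2' (prefs.map PySem.Str.lower) fvs fv := by
  induction prefs with
  | nil => rfl
  | cons p rest ih => simp [pvA_phase2, pvA2', ih]

lemma pvA1'_char (prefs fvs fv : List String) :
    pvA1' prefs fvs fv =
      match List.findIdx? (fun p => fvs.contains p) prefs with
      | none => none
      | some j =>
        match PySem.List.index? fvs (prefs.getD j "") with
        | some idx => PySem.List.pyGet? fv (idx : Int)
        | none => none := by
  induction prefs with
  | nil => rfl
  | cons p rest ih =>
    by_cases h : fvs.contains p = true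
    · have hm : p ∈ fvs := by simpa using h
      simp [pvA1', List.findIdx?_cons, hm]
    · have hf : fvs.contains p = false := by simpa using h
      simp only [pvA1', List.findIdx?_cons, hf, Bool.false_eq_true, if_false, ih]
      cases hfi : List.findIdx? (fun p => fvs.contains p) rest with
      | none => simp
      | some j => simp

lemma pvA_inner_char (pl : String) (j : Nat) (fvs fv : List String) :
    pvA_inner pl j fvs fv =
      match List.findIdx? (fun v => PySem.Str.isIn pl v) fvs with
      | some i => PySem.List.pyGet? fv ((j + i : Nat) : Int)
      | none => none := by
  induction fvs generalizing j with
  | nil => rfl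
  | cons v rest ih =>
    simp only [pvA_inner, List.findIdx?_cons]
    by_cases h : PySem.Str.isIn pl v = true
    · rw [if_pos h, if_pos h]; simp
    · rw [if_neg (by simpa using h), if_neg (by simpa using h), ih (j + 1)]
      cases hfi : List.findIdx? (fun v => PySem.Str.isIn pl v) rest with
      | none => simp
      | some i =>
        simp only [Option.map_some]
        have : j + 1 + i = j + (i + 1) := by omega
        rw [this]

lemma pvA2'_char (prefs fvs fv : List String) (hlen : fvs.length ≤ fv.length) :
    pvA2' prefs fvs fv =
      match List.findIdx? (fun p => fvs.any (fun v => PySem.Str.isIn p v)) prefs with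
      | some j =>
        match List.findIdx? (fun v => PySem.Str.isIn (prefs.getD j "") v) fvs with
        | some i => PySem.List.pyGet? fv (i : Int)
        | none => none
      | none => none := by
  induction prefs with
  | nil => rfl
  | cons p rest ih =>
    simp only [pvA2', List.findIdx?_cons]
    rw [pvA_inner_char]
    by_cases h : fvs.any (fun v => PySem.Str.isIn p v) = true
    · rw [if_pos h]
      cases hfi : List.findIdx? (fun v => PySem.Str.isIn p v) fvs with
      | none =>
        rw [List.findIdx?_eq_none_iff] at hfi
        rw [List.any_eq_true] at h
        obtain ⟨v, hv, hp⟩ := h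
        have h2 := hfi v hv
        rw [hp] at h2
        simp at h2
      | some i =>
        obtain ⟨hi, hpi, hmin⟩ := List.findIdx?_eq_some_iff_getElem.mp hfi
        have hilen : i < fv.length := lt_of_lt_of_le hi hlen
        simp only [List.getD_cons_zero]
        rw [hfi]
        simp [PySem.List.pyGet?_natCast, List.getElem?_eq_getElem hilen]
    · rw [if_neg h]
      cases hfi : List.findIdx? (fun v => PySem.Str.isIn p v) fvs with
      | some i =>
        obtain ⟨hi, hpi, hmin⟩ := List.findIdx?_eq_some_iff_getElem.mp hfi
        rw [List.any_eq_true] at h  -- h is ¬ any = true; contradiction with witness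
        exact absurd ⟨fvs[i], List.getElem_mem hi, hpi⟩ h
      | none =>
        rw [ih]
        cases hfj : List.findIdx? (fun p => fvs.any (fun v => PySem.Str.isIn p v)) rest with
        | none => simp
        | some j => simp

-- ----- characterizations of B's rank -----
lemma pvB_firstEq_eq (s : String) (prefs : List String) (j : Nat) :
    pvB_firstEq s prefs j = (List.findIdx? (fun p => s == p) prefs).map (· + j) := by
  induction prefs generalizing j with
  | nil => rfl
  | cons p rest ih =>
    simp only [pvB_firstEq, List.findIdx?_cons, ih]
    by_cases h : s == p
    · simp [h]
    · simp only [h, Bool.false_eq_true, if_false, Option.map_map]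
      congr 1; funext k; simp only [Function.comp_apply]; omega

lemma pvB_firstSub_eq (s : String) (prefs : List String) (j : Nat) :
    pvB_firstSub s prefs j = (List.findIdx? (fun p => PySem.Str.isIn p s) prefs).map (· + j) := by
  induction prefs generalizing j with
  | nil => rfl
  | cons p rest ih =>
    simp only [pvB_firstSub, List.findIdx?_cons, ih]
    by_cases h : PySem.Chars.isIn p.toList s.toList = true
    · simp [h]
    · simp only [PySem.Str.isIn_eq, h, Bool.false_eq_true, if_false, Option.map_map]
      congr 1; funext k; simp only [Function.comp_apply]; omega

lemma pvB_rank_char (prefs : List String) (s : String) :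
    pvB_rank prefs s =
      match List.findIdx? (fun p => s == p) prefs with
      | some j => (0, j)
      | none =>
        match List.findIdx? (fun p => PySem.Str.isIn p s) prefs with
        | some j => (1, j)
        | none => (2, 0) := by
  rw [pvB_rank, pvB_firstEq_eq, pvB_firstSub_eq]
  cases List.findIdx? (fun p => s == p) prefs with
  | some j => simp
  | none =>
    simp only [Option.map_none]
    cases List.findIdx? (fun p => PySem.Str.isIn p s) prefs with
    | some j => simp
    | none => simp

-- ===== VERDICT (by name: the statement is the Claim_ definition above) =====
theorem find_best_initial_value_spec : Claim_equal_find_best_initial_value := by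
  intro fv pl _
  unfold Spec_find_best_initial_value
  by_cases hemp : fv.isEmpty = true
  · simp [find_best_initial_value, find_best_initial_value_alt, hemp]
  · simp only [find_best_initial_value, find_best_initial_value_alt, hemp, Bool.false_eq_true,
      if_false, pvA_phase1_lower, pvA_phase2_lower]
    set prefs0 : List String := pl.getD ["Total", "Todos", "Todas", "Geral", "Ambos", "Ambas"] with hp0
    set prefs : List String := prefs0.map PySem.Str.lower with hp
    set fvs : List String := fv.map (fun v => PySem.Str.lower (PySem.Str.strip v)) with hf
    have hfv : fv ≠ [] := by simpa [List.isEmpty_iff] using hemp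
    have hlen : fvs.length = fv.length := by rw [hf]; exact List.length_map ..
    have hn : 0 < fv.length := List.length_pos_iff.mpr hfv
    have hsd : ∀ i, (h : i < fvs.length) → fvs.getD i "" = fvs[i] := by
      intro i h
      rw [List.getD_eq_getElem?_getD, List.getElem?_eq_getElem h]
      rfl
    -- fold facts
    obtain ⟨hmem, hmin⟩ := pvFold_inv (fun i => (pvB_rank prefs (fvs.getD i ""), i)) (fun i => rfl)
      (List.range' 1 (fvs.length - 1)) 0
    generalize hbdef : List.foldl
      (fun b i => if pvB_lt (pvB_rank prefs (fvs.getD i ""), i) (pvB_rank prefs (fvs.getD b ""), b) then i else b)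
      0 (List.range' 1 (fvs.length - 1)) = best at hmem hmin ⊢
    have hbest : best < fv.length := by
      rcases hmem with h | h
      · omega
      · rw [List.mem_range'_1] at h
        omega
    have hminAll : ∀ i, i < fv.length → i ≠ best →
        pvB_lt (pvB_rank prefs (fvs.getD best ""), best) (pvB_rank prefs (fvs.getD i ""), i) = true := by
      intro i hi hne
      rcases Nat.eq_zero_or_pos i with h0 | h0
      · exact hmin i (Or.inl h0) hne
      · exact hmin i (Or.inr (List.mem_range'_1.mpr (by omega))) hne
    -- main case split
    cases hE : List.findIdx? (fun p => fvs.contains p) prefs with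
    | some j =>
      obtain ⟨hj, hcj, hjmin⟩ := List.findIdx?_eq_some_iff_getElem.mp hE
      have hjmem : prefs[j] ∈ fvs := by simpa using hcj
      obtain ⟨i0, hi0eq⟩ := Option.isSome_iff_exists.mp
        ((PySem.List.index?_isSome_iff _ _).mpr hjmem)
      obtain ⟨hi0, hv0, hi0min⟩ := PySem.List.getElem_of_index?_eq_some hi0eq
      have hi0' : i0 < fv.length := hlen ▸ hi0
      have hgd : prefs.getD j "" = prefs[j] := by
        rw [List.getD_eq_getElem?_getD, List.getElem?_eq_getElem hj]; rfl
      simp only [pvA1'_char, hE, hgd, hi0eq, PySem.List.pyGet?_natCast,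
        List.getElem?_eq_getElem hi0']
      -- B side: key at i0 is ((0, j), i0)
      have hki0 : pvB_rank prefs (fvs.getD i0 "") = (0, j) := by
        rw [hsd i0 hi0, pvB_rank_char, hv0]
        have hfe : List.findIdx? (fun p => prefs[j] == p) prefs = some j := by
          rw [List.findIdx?_eq_some_iff_getElem]
          refine ⟨hj, by simp, ?_⟩
          intro l hl hcon
          simp only [beq_iff_eq] at hcon
          exact hjmin l hl (by simp [← hcon, hjmem])
        rw [hfe]
      have hmini0 : ∀ i, i < fv.length → i ≠ i0 →
          pvB_lt (pvB_rank prefs (fvs.getD i0 ""), i0) (pvB_rank prefs (fvs.getD i ""), i) = true := by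
        intro i hi hne
        have hif : i < fvs.length := hlen ▸ hi
        rw [hki0, hsd i hif, pvB_rank_char]
        cases hfe : List.findIdx? (fun p => fvs[i] == p) prefs with
        | none =>
          cases hfs : List.findIdx? (fun p => PySem.Str.isIn p fvs[i]) prefs with
          | some j' => simp [pvB_lt]
          | none => simp [pvB_lt]
        | some j' =>
          obtain ⟨hj', hpj', hminj'⟩ := List.findIdx?_eq_some_iff_getElem.mp hfe
          have heq : fvs[i] = prefs[j'] := by simpa using hpj'
          have hge : j ≤ j' := by
            by_contra hlt'
            push_neg at hlt'
            refine hjmin j' hlt' ?_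
            simp only [← heq]
            simpa using List.getElem_mem hif
          rcases Nat.lt_or_ge j j' with hlt2 | hge2
          · simp [pvB_lt]
            omega
          · have hjj : j' = j := by omega
            have heq2 : fvs[i] = prefs[j] := by rw [heq]; congr 1
            have hii : i0 < i := by
              rcases Nat.lt_trichotomy i i0 with h | h | h
              · exact absurd heq2 (hi0min i h)
              · exact absurd h hne
              · exact h
            rw [hjj]
            simp [pvB_lt]
            omega
      have hbeq : best = i0 :=
        pvBest_unique (fun i => (pvB_rank prefs (fvs.getD i ""), i)) fv.length best i0 hbest
          (fun i hi hne => hminAll i hi hne) hi0'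
          (fun i hi hne => hmini0 i hi hne)
      rw [hbeq, List.getElem?_eq_getElem hi0']
    | none =>
      have hnoeq : ∀ p ∈ prefs, fvs.contains p = false := List.findIdx?_eq_none_iff.mp hE
      have hfeq_none : ∀ i, (h : i < fvs.length) →
          List.findIdx? (fun p => fvs[i] == p) prefs = none := by
        intro i h
        rw [List.findIdx?_eq_none_iff]
        intro p hpmem
        have hc := hnoeq p hpmem
        simp only [beq_eq_false_iff_ne, ne_eq]
        intro hcon
        rw [← hcon] at hc
        have hm : fvs[i] ∈ fvs := List.getElem_mem h
        simp [hm] at hc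
      simp only [pvA1'_char, hE]
      cases hC : List.findIdx? (fun p => fvs.any (fun v => PySem.Str.isIn p v)) prefs with
      | some j1 =>
        obtain ⟨hj1, hpj1, hj1min⟩ := List.findIdx?_eq_some_iff_getElem.mp hC
        have hany : fvs.any (fun v => PySem.Str.isIn prefs[j1] v) = true := by simpa using hpj1
        obtain ⟨i1, hi1eq⟩ : ∃ i1, List.findIdx? (fun v => PySem.Str.isIn prefs[j1] v) fvs = some i1 := by
          cases hfi : List.findIdx? (fun v => PySem.Str.isIn prefs[j1] v) fvs with
          | none =>
            rw [List.findIdx?_eq_none_iff] at hfi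
            rw [List.any_eq_true] at hany
            obtain ⟨v, hv, hpv⟩ := hany
            have h2 := hfi v hv
            rw [hpv] at h2
            simp at h2
          | some i1 => exact ⟨i1, rfl⟩
        obtain ⟨hi1, hpi1, hi1min⟩ := List.findIdx?_eq_some_iff_getElem.mp hi1eq
        have hi1' : i1 < fv.length := hlen ▸ hi1
        have hgd : prefs.getD j1 "" = prefs[j1] := by
          rw [List.getD_eq_getElem?_getD, List.getElem?_eq_getElem hj1]; rfl
        rw [pvA2'_char prefs fvs fv (le_of_eq hlen)]
        simp only [hC, hgd, hi1eq, PySem.List.pyGet?_natCast, List.getElem?_eq_getElem hi1']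
        -- B side: key at i1 is ((1, j1), i1)
        have hki1 : pvB_rank prefs (fvs.getD i1 "") = (1, j1) := by
          rw [hsd i1 hi1, pvB_rank_char, hfeq_none i1 hi1]
          have hfs : List.findIdx? (fun p => PySem.Str.isIn p fvs[i1]) prefs = some j1 := by
            rw [List.findIdx?_eq_some_iff_getElem]
            refine ⟨hj1, by simpa using hpi1, ?_⟩
            intro l hl hcon
            have h2 := hj1min l hl
            simp only [List.any_eq_true, not_exists] at h2
            exact h2 fvs[i1] ⟨List.getElem_mem hi1, by simpa using hcon⟩
          rw [hfs]
        have hmini1 : ∀ i, i < fv.length → i ≠ i1 →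
            pvB_lt (pvB_rank prefs (fvs.getD i1 ""), i1) (pvB_rank prefs (fvs.getD i ""), i) = true := by
          intro i hi hne
          have hif : i < fvs.length := hlen ▸ hi
          rw [hki1, hsd i hif, pvB_rank_char, hfeq_none i hif]
          cases hfs : List.findIdx? (fun p => PySem.Str.isIn p fvs[i]) prefs with
          | none => simp [pvB_lt]
          | some j' =>
            obtain ⟨hj', hpj', hminj'⟩ := List.findIdx?_eq_some_iff_getElem.mp hfs
            have hge : j1 ≤ j' := by
              by_contra hlt'
              push_neg at hlt'
              have h2 := hj1min j' hlt'
              simp only [List.any_eq_true, not_exists] at h2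
              exact h2 fvs[i] ⟨List.getElem_mem hif, by simpa using hpj'⟩
            rcases Nat.lt_or_ge j1 j' with hlt2 | hge2
            · simp [pvB_lt]
              omega
            · have hjj : j' = j1 := by omega
              have hp1 : PySem.Str.isIn prefs[j1] fvs[i] = true := by
                have h3 := hpj'
                simp only [hjj] at h3
                simpa using h3
              have hii : i1 < i := by
                rcases Nat.lt_trichotomy i i1 with h | h | h
                · exact absurd hp1 (by simpa using hi1min i h)
                · exact absurd h hne
                · exact h
              rw [hjj]
              simp [pvB_lt]
              omega
        have hbeq : best = i1 :=
          pvBest_unique (fun i => (pvB_rank prefs (fvs.getD i ""), i)) fv.length best i1 hbest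
            (fun i hi hne => hminAll i hi hne) hi1'
            (fun i hi hne => hmini1 i hi hne)
        rw [hbeq, List.getElem?_eq_getElem hi1']
      | none =>
        have hnosub : ∀ p ∈ prefs, fvs.any (fun v => PySem.Str.isIn p v) = false :=
          List.findIdx?_eq_none_iff.mp hC
        rw [pvA2'_char prefs fvs fv (le_of_eq hlen)]
        simp only [hC]
        have h0 : (0 : Int) = ((0 : Nat) : Int) := rfl
        rw [h0, PySem.List.pyGet?_natCast, List.getElem?_eq_getElem hn]
        -- all keys are ((2, 0), i); best = 0
        have hk : ∀ i, (h : i < fvs.length) → pvB_rank prefs (fvs.getD i "") = (2, 0) := by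
          intro i h
          rw [hsd i h, pvB_rank_char, hfeq_none i h]
          have hfs : List.findIdx? (fun p => PySem.Str.isIn p fvs[i]) prefs = none := by
            rw [List.findIdx?_eq_none_iff]
            intro p hpmem
            have h2 := hnosub p hpmem
            rw [List.any_eq_false] at h2
            simpa using h2 fvs[i] (List.getElem_mem h)
          rw [hfs]
        have hmin0 : ∀ i, i < fv.length → i ≠ 0 →
            pvB_lt (pvB_rank prefs (fvs.getD 0 ""), 0) (pvB_rank prefs (fvs.getD i ""), i) = true := by
          intro i hi hne
          have hif : i < fvs.length := hlen ▸ hi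
          have h0f : 0 < fvs.length := by omega
          rw [hk i hif, hk 0 h0f]
          simp [pvB_lt]
          omega
        have hbeq : best = 0 :=
          pvBest_unique (fun i => (pvB_rank prefs (fvs.getD i ""), i)) fv.length best 0 hbest
            (fun i hi hne => hminAll i hi hne) hn
            (fun i hi hne => hmin0 i hi hne)
        rw [hbeq, List.getElem?_eq_getElem hn]
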